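-- pv_equiv track=rewrite | github.com/arrAugusto/reas_peliculas | peliculas.py | recomendar_pelicula
-- ===== SOURCE A (Python) =====
-- def recomendar_pelicula(historial, peliculas):
--     # Encontrar los géneros más preferidos del usuario
--     generos_preferidos = {}
--
--     for pelicula, calificacion in historial.items():
--         if pelicula in peliculas:
--             for genero in peliculas[pelicula]:
--                 generos_preferidos[genero] = generos_preferidos.get(genero, 0) + calificacion
--
--     # Ordenar los géneros según preferencia
--     generos_ordenados = sorted(generos_preferidos, key=generos_preferidos.get, reverse=True)
--
--     # Buscar una película recomendada basada en los géneros favoritos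
--     for pelicula, generos in peliculas.items():
--         if pelicula not in historial:  # Evitar recomendar películas ya vistas
--             if any(genero in generos_ordenados for genero in generos):
--                 return pelicula
--
--     return "No hay recomendaciones disponibles"
-- ===== SOURCE B (Python) =====
-- def recomendar_pelicula(historial, peliculas):
--     # Direct nested scan: no preferred-genre index is built.
--     for pelicula, generos in peliculas.items():
--         if pelicula in historial:
--             continue
--         for vista in historial:
--             if vista in peliculas and any(g in peliculas[vista] for g in generos):
--                 return pelicula
--     return "No hay recomendaciones disponibles"
-- ===== Notes on version B (the rewrite author's own statement) =====
-- stated objective: simpler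
-- what changed: B drops A's genre-score dictionary and its sort entirely (the scores and the sorted order never influenced A's answer) and instead rechecks the watched movies directly per candidate for a shared genre.
import Mathlib
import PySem

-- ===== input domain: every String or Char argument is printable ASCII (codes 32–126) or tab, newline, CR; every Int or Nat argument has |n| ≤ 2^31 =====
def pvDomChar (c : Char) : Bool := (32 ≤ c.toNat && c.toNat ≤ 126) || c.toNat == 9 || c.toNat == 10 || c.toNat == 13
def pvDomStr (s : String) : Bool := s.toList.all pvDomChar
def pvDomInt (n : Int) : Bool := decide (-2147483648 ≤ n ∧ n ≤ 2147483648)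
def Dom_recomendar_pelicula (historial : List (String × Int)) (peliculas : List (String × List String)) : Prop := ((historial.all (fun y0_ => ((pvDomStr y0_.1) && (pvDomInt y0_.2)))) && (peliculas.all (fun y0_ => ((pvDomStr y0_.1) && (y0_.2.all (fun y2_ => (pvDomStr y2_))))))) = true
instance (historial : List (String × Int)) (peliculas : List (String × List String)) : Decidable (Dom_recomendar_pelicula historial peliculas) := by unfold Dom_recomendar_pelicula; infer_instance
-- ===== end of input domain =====

-- B drops A's genre-score dict and sort and rechecks the watched movies per candidate; proof: return value equal on the whole domain.
-- ===== PORT A =====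
-- peliculas[p]: first-match association-list lookup
def pvLookup (peliculas : List (String × List String)) (p : String) : List String :=
  (((peliculas.find? (fun q => q.1 == p)).map (·.2)).getD [])

-- the final 'for pelicula, generos in peliculas.items(): …' loop of A
def pvBuscarA (historial : List (String × Int)) (ord : List String) : List (String × List String) → String
  | [] => "No hay recomendaciones disponibles"
  | (p, gens) :: rest =>
    if (historial.map (·.1)).contains p then pvBuscarA historial ord rest
    else if gens.any (fun g => ord.contains g) then p
    else pvBuscarA historial ord rest

def recomendar_pelicula (historial : List (String × Int)) (peliculas : List (String × List String)) : String :=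
  let generos_preferidos : PySem.Dict String Int :=
    historial.foldl (fun d pc =>
      if (peliculas.map (·.1)).contains pc.1 then
        (pvLookup peliculas pc.1).foldl (fun d g => d.modify g 0 (· + pc.2)) d
      else d) PySem.Dict.empty
  let generos_ordenados : List String :=
    PySem.List.sorted generos_preferidos.keys (fun g => generos_preferidos.getD g 0) true
  pvBuscarA historial generos_ordenados peliculas

-- ===== PORT B =====
-- B's candidate loop: for each unseen candidate, rescan the watched movies for a shared genre
def pvBuscarB (historial : List (String × Int)) (todas : List (String × List String)) : List (String × List String) → String
  | [] => "No hay recomendaciones disponibles"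
  | (p, gens) :: rest =>
    if (historial.map (·.1)).contains p then pvBuscarB historial todas rest
    else if historial.any (fun vc =>
           (todas.map (·.1)).contains vc.1 &&
           gens.any (fun g => (pvLookup todas vc.1).contains g)) then p
    else pvBuscarB historial todas rest

def recomendar_pelicula_alt (historial : List (String × Int)) (peliculas : List (String × List String)) : String :=
  pvBuscarB historial peliculas peliculas

-- ===== PRECONDITION & SPEC =====
def Spec_recomendar_pelicula (historial : List (String × Int)) (peliculas : List (String × List String)) (out : String) : Prop := out = recomendar_pelicula_alt historial peliculas
instance (historial : List (String × Int)) (peliculas : List (String × List String)) (out : String) : Decidable (Spec_recomendar_pelicula historial peliculas out) := by unfold Spec_recomendar_pelicula; infer_instance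

-- ===== CLAIM (what is proved, stated in full; the proofs are below) =====
def Claim_equal_recomendar_pelicula : Prop := ∀ (historial : List (String × Int)) (peliculas : List (String × List String)), Dom_recomendar_pelicula historial peliculas → Spec_recomendar_pelicula historial peliculas (recomendar_pelicula historial peliculas)

-- ===== LEMMAS AND PROOFS =====
-- membership in the genre-score dict built by A's first loop
theorem pvKeys_mem (historial : List (String × Int)) (peliculas : List (String × List String))
    (d : PySem.Dict String Int) (g : String) :
    (g ∈ (historial.foldl (fun d pc =>
      if (peliculas.map (·.1)).contains pc.1 then
        (pvLookup peliculas pc.1).foldl (fun d g => d.modify g 0 (· + pc.2)) d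
      else d) d).keys) ↔
    (g ∈ d.keys ∨ ∃ pc ∈ historial, (peliculas.map (·.1)).contains pc.1 = true ∧ g ∈ pvLookup peliculas pc.1) := by
  induction historial generalizing d with
  | nil => simp
  | cons pc hist ih =>
    simp only [List.foldl_cons, ih, List.mem_cons]
    by_cases h : (peliculas.map (·.1)).contains pc.1 = true
    · rw [if_pos h]
      rw [show ((pvLookup peliculas pc.1).foldl (fun d g => d.modify g 0 (· + pc.2)) d).keys
            = PySem.Set.update d.keys (pvLookup peliculas pc.1) from PySem.Dict.keys_foldl_modify (pvLookup peliculas pc.1) (f := fun _ _ y => y + pc.2) 0 d]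
      rw [PySem.Set.mem_update]
      constructor
      · rintro (((hg | hg) | ⟨q, hq, hc, hgq⟩))
        · exact Or.inl hg
        · exact Or.inr ⟨pc, Or.inl rfl, h, hg⟩
        · exact Or.inr ⟨q, Or.inr hq, hc, hgq⟩
      · rintro (hg | ⟨q, (rfl | hq), hc, hgq⟩)
        · exact Or.inl (Or.inl hg)
        · exact Or.inl (Or.inr hgq)
        · exact Or.inr ⟨q, hq, hc, hgq⟩
    · rw [if_neg h]
      constructor
      · rintro (hg | ⟨q, hq, hc, hgq⟩)
        · exact Or.inl hg
        · exact Or.inr ⟨q, Or.inr hq, hc, hgq⟩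
      · rintro (hg | ⟨q, (rfl | hq), hc, hgq⟩)
        · exact Or.inl hg
        · exact absurd hc h
        · exact Or.inr ⟨q, hq, hc, hgq⟩

-- the two loops agree when 'g ∈ ord' characterises 'some watched movie in the catalogue has g'
theorem pvBuscar_eq (historial : List (String × Int)) (todas : List (String × List String))
    (ord : List String)
    (hord : ∀ g, g ∈ ord ↔ ∃ pc ∈ historial, (todas.map (·.1)).contains pc.1 = true ∧ g ∈ pvLookup todas pc.1) :
    ∀ l, pvBuscarA historial ord l = pvBuscarB historial todas l := by
  intro l
  induction l with
  | nil => rfl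
  | cons h rest ih =>
    obtain ⟨p, gens⟩ := h
    simp only [pvBuscarA, pvBuscarB]
    by_cases hseen : (historial.map (·.1)).contains p = true
    · rw [if_pos hseen, if_pos hseen, ih]
    · rw [if_neg hseen, if_neg hseen]
      have : (gens.any (fun g => ord.contains g))
           = (historial.any (fun vc => (todas.map (·.1)).contains vc.1 &&
               gens.any (fun g => (pvLookup todas vc.1).contains g))) := by
        rw [Bool.eq_iff_iff]
        simp only [List.any_eq_true, List.contains_iff_mem, Bool.and_eq_true]
        constructor
        · rintro ⟨g, hg, hmem⟩
          obtain ⟨pc, hpc, hc, hgl⟩ := (hord g).mp hmem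
          exact ⟨pc, hpc, List.contains_iff_mem.mp hc, g, hg, hgl⟩
        · rintro ⟨pc, hpc, hc, g, hg, hgl⟩
          exact ⟨g, hg, (hord g).mpr ⟨pc, hpc, List.contains_iff_mem.mpr hc, hgl⟩⟩
      rw [this, ih]

-- ===== VERDICT (by name: the statement is the Claim_ definition above) =====
theorem recomendar_pelicula_spec : Claim_equal_recomendar_pelicula := by
  intro historial peliculas _
  unfold Spec_recomendar_pelicula recomendar_pelicula recomendar_pelicula_alt
  apply pvBuscar_eq
  intro g
  rw [PySem.List.mem_sorted]
  rw [pvKeys_mem]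
  simp
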